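-- pv_equiv track=rewrite | github.com/daniel-reich/ubiquitous-fiesta | BcjsjPPmPEMQwB86Y_22.py | get_consonant_substrings
-- ===== SOURCE A (Python) =====
-- def get_consonant_substrings(txt):
--     soc = set()
--     for i, x in enumerate(txt):
--         if x not in 'aeiou':
--             for j in range(i, len(txt)):
--                 if txt[j] not in 'aeiou':
--                     soc.add(txt[i:j+1])
--     return sorted(soc)
-- ===== SOURCE B (Python) =====
-- def get_consonant_substrings(txt):
--     cons = [k for k, ch in enumerate(txt) if ch not in 'aeiou']
--     soc = set()
--     for ai in range(len(cons)):
--         for bi in range(ai, len(cons)):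
--             soc.add(txt[cons[ai]:cons[bi] + 1])
--     return sorted(soc)
-- ===== Notes on version B (the rewrite author's own statement) =====
-- stated objective: alternative
-- what changed: B precomputes the list of consonant positions once and iterates over pairs of entries of that index table, replacing A's per-character re-scan of txt with a vowel guard inside both loops.
import Mathlib
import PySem

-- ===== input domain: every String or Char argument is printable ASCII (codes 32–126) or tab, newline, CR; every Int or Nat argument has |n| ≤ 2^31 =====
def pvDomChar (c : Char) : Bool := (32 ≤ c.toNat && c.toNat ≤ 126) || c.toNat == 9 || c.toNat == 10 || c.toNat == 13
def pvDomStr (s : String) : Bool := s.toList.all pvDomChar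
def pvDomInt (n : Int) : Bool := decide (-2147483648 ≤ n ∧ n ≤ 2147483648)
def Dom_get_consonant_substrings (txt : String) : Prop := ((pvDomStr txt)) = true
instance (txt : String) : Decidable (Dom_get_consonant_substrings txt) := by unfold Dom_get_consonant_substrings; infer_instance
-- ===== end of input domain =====

-- B precomputes the list of consonant positions once and iterates over pairs of
-- entries of that table instead of re-scanning txt with a vowel guard (objective: alternative).

-- x in 'aeiou' for a single character x
def pvVowel (c : Char) : Bool := c = 'a' || c = 'e' || c = 'i' || c = 'o' || c = 'u'

-- ===== PORT A =====
def get_consonant_substrings (txt : String) : List String :=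
  let cs := txt.toList
  let soc : PySem.Set String :=
    (PySem.List.enumerate cs 0).foldl (fun soc p =>
      if !(pvVowel p.2) then
        (PySem.List.pyRange p.1 (cs.length : Int) 1).foldl (fun soc j =>
          if !(pvVowel (PySem.List.pyGetD cs j ' ')) then
            PySem.Set.add soc (String.ofList (PySem.List.slice cs (some p.1) (some (j + 1))))
          else soc) soc
      else soc) PySem.Set.empty
  PySem.List.sorted soc (fun x => x) false

-- ===== PORT B =====
def get_consonant_substrings_alt (txt : String) : List String :=
  let cs := txt.toList
  let cons : List Int :=
    ((PySem.List.enumerate cs 0).filter (fun p => !(pvVowel p.2))).map (fun p => p.1)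
  let soc : PySem.Set String :=
    (PySem.List.pyRange 0 (cons.length : Int) 1).foldl (fun soc ai =>
      (PySem.List.pyRange ai (cons.length : Int) 1).foldl (fun soc bi =>
        PySem.Set.add soc (String.ofList (PySem.List.slice cs
          (some (PySem.List.pyGetD cons ai 0)) (some (PySem.List.pyGetD cons bi 0 + 1))))) soc)
      PySem.Set.empty
  PySem.List.sorted soc (fun x => x) false

-- ===== PRECONDITION & SPEC =====
def Spec_get_consonant_substrings (txt : String) (out : List String) : Prop := out = get_consonant_substrings_alt txt
instance (txt : String) (out : List String) : Decidable (Spec_get_consonant_substrings txt out) := by unfold Spec_get_consonant_substrings; infer_instance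

-- ===== CLAIM (what is proved, stated in full; the proofs are below) =====
def Claim_equal_get_consonant_substrings : Prop := ∀ (txt : String), Dom_get_consonant_substrings txt → Spec_get_consonant_substrings txt (get_consonant_substrings txt)

-- ===== LEMMAS AND PROOFS =====

theorem pv_mem_foldl_step {α β : Type} (F : List α → β → List α) (Q : β → α → Prop)
    (h : ∀ s b x, x ∈ F s b ↔ x ∈ s ∨ Q b x) (l : List β) (s0 : List α) (x : α) :
    x ∈ l.foldl F s0 ↔ x ∈ s0 ∨ ∃ b ∈ l, Q b x := by
  induction l generalizing s0 with
  | nil => simp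
  | cons b l ih => simp [List.foldl, ih, h]; tauto

theorem pv_nodup_foldl_step {α β : Type} (F : List α → β → List α)
    (h : ∀ s b, s.Nodup → (F s b).Nodup) (l : List β) (s0 : List α) (h0 : s0.Nodup) :
    (l.foldl F s0).Nodup := by
  induction l generalizing s0 with
  | nil => exact h0
  | cons b l ih => exact ih _ (h _ _ h0)

theorem pv_mem_add {α : Type} [BEq α] [LawfulBEq α] (s : List α) (y x : α) :
    x ∈ PySem.Set.add s y ↔ x ∈ s ∨ x = y := by
  simp [PySem.Set.add, PySem.Set.contains]
  split_ifs with hc <;> simp_all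

theorem pv_nodup_add {α : Type} [BEq α] [LawfulBEq α] (s : List α) (y : α) (h : s.Nodup) :
    (PySem.Set.add s y).Nodup := by
  simp [PySem.Set.add, PySem.Set.contains]
  split_ifs with hc
  · exact h
  · simp [List.nodup_append, h]
    exact fun a ha he => hc (he ▸ ha)

-- proof-side names for the two accumulated sets and the substring constructor
def pvSub (cs : List Char) (i j : Int) : String :=
  String.ofList (PySem.List.slice cs (some i) (some (j + 1)))

def pvSocA (cs : List Char) : List String :=
  (PySem.List.enumerate cs 0).foldl (fun soc p =>
    if !(pvVowel p.2) then
      (PySem.List.pyRange p.1 (cs.length : Int) 1).foldl (fun soc j =>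
        if !(pvVowel (PySem.List.pyGetD cs j ' ')) then
          PySem.Set.add soc (String.ofList (PySem.List.slice cs (some p.1) (some (j + 1))))
        else soc) soc
    else soc) PySem.Set.empty

def pvCons (cs : List Char) : List Int :=
  ((PySem.List.enumerate cs 0).filter (fun p => !(pvVowel p.2))).map (fun p => p.1)

def pvSocB (cs : List Char) : List String :=
  (PySem.List.pyRange 0 ((pvCons cs).length : Int) 1).foldl (fun soc ai =>
    (PySem.List.pyRange ai ((pvCons cs).length : Int) 1).foldl (fun soc bi =>
      PySem.Set.add soc (String.ofList (PySem.List.slice cs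
        (some (PySem.List.pyGetD (pvCons cs) ai 0)) (some (PySem.List.pyGetD (pvCons cs) bi 0 + 1))))) soc)
    PySem.Set.empty

theorem pvA_eq (txt : String) :
    get_consonant_substrings txt = PySem.List.sorted (pvSocA txt.toList) (fun x => x) false := rfl

theorem pvB_eq (txt : String) :
    get_consonant_substrings_alt txt = PySem.List.sorted (pvSocB txt.toList) (fun x => x) false := rfl

-- the common membership predicate: x is a substring of cs from a consonant position i to a consonant position j
def pvP (cs : List Char) (x : String) : Prop :=
  ∃ (i j : Nat), ∃ (hi : i < cs.length) (hj : j < cs.length),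
    i ≤ j ∧ pvVowel cs[i] = false ∧ pvVowel cs[j] = false ∧ x = pvSub cs (i : Int) (j : Int)

theorem pv_mem_socA (cs : List Char) (x : String) : x ∈ pvSocA cs ↔ pvP cs x := by
  unfold pvSocA
  rw [pv_mem_foldl_step _ (fun (p : Int × Char) x => (!(pvVowel p.2)) = true ∧
        ∃ j ∈ PySem.List.pyRange p.1 (cs.length : Int) 1,
          (!(pvVowel (PySem.List.pyGetD cs j ' '))) = true ∧ x = pvSub cs p.1 j) ?_]
  · simp only [PySem.Set.empty, List.not_mem_nil, false_or, PySem.List.mem_enumerate_iff,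
      PySem.List.mem_pyRange_one, pvP]
    constructor
    · rintro ⟨p, ⟨k, hk, rfl⟩, hcons, j, ⟨hj0, hjn⟩, hcj, rfl⟩
      obtain ⟨m, rfl⟩ : ∃ m : Nat, j = (m : Int) :=
        ⟨j.toNat, by omega⟩
      simp only [zero_add] at hj0 hcj ⊢
      have hkm : k ≤ m := by exact_mod_cast hj0
      have hmn : m < cs.length := by exact_mod_cast hjn
      refine ⟨k, m, hk, hmn, hkm, by simpa using hcons, ?_, rfl⟩
      simpa [PySem.List.pyGetD_natCast, List.getD_eq_getElem?_getD,
        List.getElem?_eq_getElem hmn] using hcj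
    · rintro ⟨i, j, hi, hj, hij, hci, hcj, rfl⟩
      refine ⟨((i : Int), cs[i]), ⟨i, hi, by simp⟩, by simp [hci], (j : Int),
        ⟨by omega, by omega⟩, ?_, by simp⟩
      simp [PySem.List.pyGetD_natCast, List.getD_eq_getElem?_getD,
        List.getElem?_eq_getElem hj, hcj]
  · intro s p x
    dsimp only
    split
    · rename_i hp
      rw [pv_mem_foldl_step _ (fun (j : Int) x =>
            (!(pvVowel (PySem.List.pyGetD cs j ' '))) = true ∧ x = pvSub cs p.1 j) ?_]
      · simp [hp]
      · intro s' j x'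
        dsimp only
        split
        · rename_i hcj
          rw [pv_mem_add]
          simp [hcj, pvSub]
        · rename_i hcj
          simp [hcj]
    · rename_i hp
      simp [hp]

theorem pv_mem_pvCons (cs : List Char) (v : Int) :
    v ∈ pvCons cs ↔ ∃ (m : Nat) (h : m < cs.length), v = (m : Int) ∧ pvVowel cs[m] = false := by
  unfold pvCons
  simp only [List.mem_map, List.mem_filter, PySem.List.mem_enumerate_iff]
  constructor
  · rintro ⟨p, ⟨⟨k, hk, rfl⟩, hc⟩, rfl⟩
    exact ⟨k, hk, by simp, by simpa using hc⟩
  · rintro ⟨m, hm, rfl, hc⟩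
    exact ⟨((m : Int), cs[m]), ⟨⟨m, hm, by simp⟩, by simp [hc]⟩, rfl⟩

theorem pv_pairwise_pvCons (cs : List Char) : (pvCons cs).Pairwise (· < ·) := by
  unfold pvCons
  exact List.Pairwise.map _ (fun a b h => h)
    (List.Pairwise.filter _ (PySem.List.pairwise_lt_enumerate cs 0))

theorem pv_getElem_pvCons_mono (cs : List Char) (a b : Nat) (hab : a ≤ b)
    (hb : b < (pvCons cs).length) : (pvCons cs)[a]'(lt_of_le_of_lt hab hb) ≤ (pvCons cs)[b] := by
  rcases Nat.lt_or_ge a b with h | h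
  · exact le_of_lt ((List.pairwise_iff_getElem.mp (pv_pairwise_pvCons cs)) a b _ hb h)
  · have : a = b := le_antisymm hab h
    subst this; rfl

theorem pv_mem_socB (cs : List Char) (x : String) : x ∈ pvSocB cs ↔ pvP cs x := by
  unfold pvSocB
  rw [pv_mem_foldl_step _ (fun (ai : Int) x =>
        ∃ bi ∈ PySem.List.pyRange ai ((pvCons cs).length : Int) 1,
          x = pvSub cs (PySem.List.pyGetD (pvCons cs) ai 0) (PySem.List.pyGetD (pvCons cs) bi 0)) ?_]
  · simp only [PySem.Set.empty, List.not_mem_nil, false_or, PySem.List.mem_pyRange_one]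
    constructor
    · rintro ⟨ai, ⟨hai0, haiL⟩, bi, ⟨hab, hbiL⟩, rfl⟩
      obtain ⟨a, rfl⟩ : ∃ a : Nat, ai = (a : Int) := ⟨ai.toNat, by omega⟩
      obtain ⟨b, rfl⟩ : ∃ b : Nat, bi = (b : Int) := ⟨bi.toNat, by omega⟩
      have haL : a < (pvCons cs).length := by exact_mod_cast haiL
      have hbL : b < (pvCons cs).length := by exact_mod_cast hbiL
      have hab' : a ≤ b := by exact_mod_cast hab
      have hga : PySem.List.pyGetD (pvCons cs) (a : Int) 0 = (pvCons cs)[a] := by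
        simp [PySem.List.pyGetD_natCast, List.getD_eq_getElem?_getD, List.getElem?_eq_getElem haL]
      have hgb : PySem.List.pyGetD (pvCons cs) (b : Int) 0 = (pvCons cs)[b] := by
        simp [PySem.List.pyGetD_natCast, List.getD_eq_getElem?_getD, List.getElem?_eq_getElem hbL]
      rw [hga, hgb]
      obtain ⟨i, hi, hia, hci⟩ := (pv_mem_pvCons cs _).mp (List.getElem_mem haL)
      obtain ⟨j, hj, hjb, hcj⟩ := (pv_mem_pvCons cs _).mp (List.getElem_mem hbL)
      have hij : (i : Int) ≤ (j : Int) := by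
        rw [← hia, ← hjb]; exact pv_getElem_pvCons_mono cs a b hab' hbL
      exact ⟨i, j, hi, hj, by exact_mod_cast hij, hci, hcj, by rw [hia, hjb]⟩
    · rintro ⟨i, j, hi, hj, hij, hci, hcj, rfl⟩
      have hiMem : (i : Int) ∈ pvCons cs := (pv_mem_pvCons cs _).mpr ⟨i, hi, rfl, hci⟩
      have hjMem : (j : Int) ∈ pvCons cs := (pv_mem_pvCons cs _).mpr ⟨j, hj, rfl, hcj⟩
      obtain ⟨a, haL, ha⟩ := List.getElem_of_mem hiMem
      obtain ⟨b, hbL, hb⟩ := List.getElem_of_mem hjMem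
      have hab : a ≤ b := by
        by_contra hcon
        have hlt := (List.pairwise_iff_getElem.mp (pv_pairwise_pvCons cs)) b a hbL haL
          (Nat.lt_of_not_le hcon)
        rw [ha, hb] at hlt
        have : j < i := by exact_mod_cast hlt
        omega
      have hga : PySem.List.pyGetD (pvCons cs) (a : Int) 0 = (i : Int) := by
        rw [← ha]
        simp [PySem.List.pyGetD_natCast, List.getD_eq_getElem?_getD, List.getElem?_eq_getElem haL]
      have hgb : PySem.List.pyGetD (pvCons cs) (b : Int) 0 = (j : Int) := by
        rw [← hb]
        simp [PySem.List.pyGetD_natCast, List.getD_eq_getElem?_getD, List.getElem?_eq_getElem hbL]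
      exact ⟨(a : Int), ⟨by positivity, by exact_mod_cast lt_of_le_of_lt hab hbL⟩,
        (b : Int), ⟨by exact_mod_cast hab, by exact_mod_cast hbL⟩, by rw [hga, hgb]⟩
  · intro s ai x'
    rw [pv_mem_foldl_step _ (fun (bi : Int) x =>
          x = pvSub cs (PySem.List.pyGetD (pvCons cs) ai 0) (PySem.List.pyGetD (pvCons cs) bi 0)) ?_]
    intro s' bi x''
    dsimp only
    rw [pv_mem_add]
    simp [pvSub]

theorem pv_nodup_socA (cs : List Char) : (pvSocA cs).Nodup := by
  unfold pvSocA
  apply pv_nodup_foldl_step _ ?_ _ _ (by simp [PySem.Set.empty])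
  intro s p hs
  dsimp only
  split
  · apply pv_nodup_foldl_step _ ?_ _ _ hs
    intro s' j hs'
    dsimp only
    split
    · exact pv_nodup_add _ _ hs'
    · exact hs'
  · exact hs

theorem pv_nodup_socB (cs : List Char) : (pvSocB cs).Nodup := by
  unfold pvSocB
  apply pv_nodup_foldl_step _ ?_ _ _ (by simp [PySem.Set.empty])
  intro s ai hs
  apply pv_nodup_foldl_step _ ?_ _ _ hs
  intro s' bi hs'
  exact pv_nodup_add _ _ hs'

theorem get_consonant_substrings_spec : Claim_equal_get_consonant_substrings := by
  intro txt _
  unfold Spec_get_consonant_substrings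
  rw [pvA_eq, pvB_eq]
  apply PySem.List.sorted_eq_sorted_of_perm _ _ _ (fun a b h => h)
  rw [List.perm_ext_iff_of_nodup (pv_nodup_socA _) (pv_nodup_socB _)]
  intro a
  rw [pv_mem_socA, pv_mem_socB]

-- ===== VERDICT (by name: the statement is the Claim_ definition above) =====
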